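-- pv_equiv track=rewrite | github.com/LogosLang/prologos | racket/prologos/tools/convert-test-support.py | remove_here_lib_dir_definitions
-- ===== SOURCE A (Python) =====
-- def remove_here_lib_dir_definitions(content: str) -> str:
--     """Remove the (define here ...) and (define lib-dir ...) lines.
--
--     These are always exactly:
--         (define here (path->string (path-only (syntax-source #'here))))
--         (define lib-dir (simplify-path (build-path here ".." "lib")))
--
--     Also removes surrounding blank lines and comments like:
--         ;; Compute the lib directory path
--     """
--     lines = content.split("\n")
--     result = []
--     skip_next_blank = False
--
--     i = 0
--     while i < len(lines):
--         line = lines[i]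
--         stripped = line.strip()
--
--         # Remove the here definition
--         if stripped.startswith("(define here") and "syntax-source" in stripped:
--             skip_next_blank = True
--             i += 1
--             continue
--
--         # Remove the lib-dir definition
--         if stripped.startswith("(define lib-dir") and "build-path here" in stripped:
--             skip_next_blank = True
--             i += 1
--             continue
--
--         # Remove the prelude-lib-dir definition (some files already use this name)
--         if stripped.startswith("(define prelude-lib-dir") and "build-path here" in stripped:
--             skip_next_blank = True
--             i += 1
--             continue
--
--         # Remove common comment headers for these definitions
--         if stripped in (
--             ";; Compute the lib directory path",
--             ";; Compute lib-dir from this file's location",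
--             ";; Helper for namespace-aware execution",
--         ):
--             skip_next_blank = True
--             i += 1
--             continue
--
--         # Skip blank lines immediately after removed lines (avoid double-blanks)
--         if skip_next_blank and stripped == "":
--             skip_next_blank = False
--             i += 1
--             continue
--
--         skip_next_blank = False
--         result.append(line)
--         i += 1
--
--     return "\n".join(result)
-- ===== SOURCE B (Python) =====
-- def _is_removed(line: str) -> bool:
--     s = line.strip()
--     return ((s.startswith("(define here") and "syntax-source" in s)
--             or (s.startswith("(define lib-dir") and "build-path here" in s)
--             or (s.startswith("(define prelude-lib-dir") and "build-path here" in s)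
--             or s in (
--                 ";; Compute the lib directory path",
--                 ";; Compute lib-dir from this file's location",
--                 ";; Helper for namespace-aware execution",
--             ))
--
--
-- def remove_here_lib_dir_definitions(content: str) -> str:
--     lines = content.split("\n")
--     removed = {i for i, line in enumerate(lines) if _is_removed(line)}
--     kept = [line for i, line in enumerate(lines)
--             if i not in removed
--             and not (line.strip() == "" and i - 1 in removed)]
--     return "\n".join(kept)
-- ===== Notes on version B (the rewrite author's own statement) =====
-- stated objective: simpler
-- what changed: Replaces the index loop carrying a skip_next_blank flag with a precomputed set of removed line indices and one declarative filtering comprehension that keeps a line unless it is removed or it is blank and follows a removed line.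
import Mathlib
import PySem

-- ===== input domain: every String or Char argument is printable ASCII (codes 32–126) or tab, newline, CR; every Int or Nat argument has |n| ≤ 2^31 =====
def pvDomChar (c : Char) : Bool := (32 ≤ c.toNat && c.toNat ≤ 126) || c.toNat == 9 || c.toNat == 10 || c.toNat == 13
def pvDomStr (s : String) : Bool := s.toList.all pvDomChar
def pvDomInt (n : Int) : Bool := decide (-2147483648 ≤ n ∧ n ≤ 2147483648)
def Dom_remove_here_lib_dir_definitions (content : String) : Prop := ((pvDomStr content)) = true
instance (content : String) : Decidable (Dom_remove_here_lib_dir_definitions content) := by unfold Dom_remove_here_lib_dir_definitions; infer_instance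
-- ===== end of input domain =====

-- B replaces A's flag-carrying index loop by a precomputed set of removed line indices
-- plus one filtering pass (simpler decomposition, same cost).

-- ===== PORT A =====
-- A's while-loop: structural recursion over the lines, carrying skip_next_blank
def pvGoA : List String → Bool → List String
  | [], _ => []
  | line :: rest, skip =>
    let stripped := PySem.Str.strip line
    if PySem.Str.startswith stripped "(define here" && PySem.Str.isIn "syntax-source" stripped then
      pvGoA rest true
    else if PySem.Str.startswith stripped "(define lib-dir" && PySem.Str.isIn "build-path here" stripped then
      pvGoA rest true
    else if PySem.Str.startswith stripped "(define prelude-lib-dir" && PySem.Str.isIn "build-path here" stripped then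
      pvGoA rest true
    else if ((stripped == ";; Compute the lib directory path"
         || stripped == ";; Compute lib-dir from this file's location"
         || stripped == ";; Helper for namespace-aware execution" : Bool)) then
      pvGoA rest true
    else if ((skip && stripped == "" : Bool)) then
      pvGoA rest false
    else
      line :: pvGoA rest false

def remove_here_lib_dir_definitions (content : String) : String :=
  -- content.split("\n"): separator is the non-empty literal, so split? is always some
  let lines := (PySem.Str.split? content "\n").getD []
  PySem.Str.join "\n" (pvGoA lines false)

-- ===== PORT B =====
def pvIsRemoved (line : String) : Bool :=
  let s := PySem.Str.strip line
  (PySem.Str.startswith s "(define here" && PySem.Str.isIn "syntax-source" s) ||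
  (PySem.Str.startswith s "(define lib-dir" && PySem.Str.isIn "build-path here" s) ||
  (PySem.Str.startswith s "(define prelude-lib-dir" && PySem.Str.isIn "build-path here" s) ||
  (s == ";; Compute the lib directory path"
   || s == ";; Compute lib-dir from this file's location"
   || s == ";; Helper for namespace-aware execution")

def remove_here_lib_dir_definitions_alt (content : String) : String :=
  let lines := (PySem.Str.split? content "\n").getD []
  let removed : PySem.Set Int := PySem.Set.ofList
    ((PySem.List.enumerate lines).filterMap (fun p => if pvIsRemoved p.2 then some p.1 else none))
  let kept := ((PySem.List.enumerate lines).filter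
    (fun p => !(PySem.Set.contains removed p.1)
           && !(PySem.Str.strip p.2 == "" && PySem.Set.contains removed (p.1 - 1)))).map (fun p => p.2)
  PySem.Str.join "\n" kept

-- ===== PRECONDITION & SPEC =====
def Spec_remove_here_lib_dir_definitions (content : String) (out : String) : Prop := out = remove_here_lib_dir_definitions_alt content
instance (content : String) (out : String) : Decidable (Spec_remove_here_lib_dir_definitions content out) := by unfold Spec_remove_here_lib_dir_definitions; infer_instance

-- ===== CLAIM (what is proved, stated in full; the proofs are below) =====
def Claim_equal_remove_here_lib_dir_definitions : Prop := ∀ (content : String), Dom_remove_here_lib_dir_definitions content → Spec_remove_here_lib_dir_definitions content (remove_here_lib_dir_definitions content)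

-- ===== LEMMAS AND PROOFS =====

-- B's set of removed indices, as a function of the line list
def pvRemovedOf (L : List String) : PySem.Set Int :=
  PySem.Set.ofList
    ((PySem.List.enumerate L).filterMap (fun p => if pvIsRemoved p.2 then some p.1 else none))

lemma pv_mem_enum_filterMap (L : List String) (s i : Int) :
    i ∈ (PySem.List.enumerate L s).filterMap (fun p => if pvIsRemoved p.2 then some p.1 else none)
    ↔ s ≤ i ∧ i < s + L.length ∧ pvIsRemoved (L.getD (i - s).toNat "") = true := by
  induction L generalizing s with
  | nil =>
    simp only [PySem.List.enumerate_nil, List.filterMap_nil, List.not_mem_nil, false_iff,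
      List.length_nil, Nat.cast_zero, add_zero, not_and]
    intro h1 h2; omega
  | cons l rest ih =>
    rw [PySem.List.enumerate_cons, List.filterMap_cons]
    by_cases h : pvIsRemoved l = true
    · simp only [h, if_true, List.mem_cons, List.length_cons]
      constructor
      · rintro (rfl | hmem)
        · refine ⟨le_refl _, by push_cast; omega, ?_⟩
          rw [show (i - i).toNat = 0 by omega, List.getD_cons_zero]
          exact h
        · obtain ⟨h1, h2, h3⟩ := (ih (s + 1)).1 hmem
          refine ⟨by omega, by push_cast at h2 ⊢; omega, ?_⟩
          rw [show (i - s).toNat = (i - (s + 1)).toNat + 1 by omega, List.getD_cons_succ]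
          exact h3
      · rintro ⟨h1, h2, h3⟩
        by_cases he : i = s
        · exact Or.inl he
        · refine Or.inr ((ih (s + 1)).2 ⟨by omega, by push_cast at h2 ⊢; omega, ?_⟩)
          rw [show (i - s).toNat = (i - (s + 1)).toNat + 1 by omega, List.getD_cons_succ] at h3
          exact h3
    · simp only [h, Bool.false_eq_true, if_false, List.length_cons]
      rw [ih (s + 1)]
      constructor
      · rintro ⟨h1, h2, h3⟩
        refine ⟨by omega, by push_cast at h2 ⊢; omega, ?_⟩
        rw [show (i - s).toNat = (i - (s + 1)).toNat + 1 by omega, List.getD_cons_succ]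
        exact h3
      · rintro ⟨h1, h2, h3⟩
        have hne : i ≠ s := by
          rintro rfl
          rw [show (i - i).toNat = 0 by omega, List.getD_cons_zero] at h3
          exact h h3
        refine ⟨by omega, by push_cast at h2 ⊢; omega, ?_⟩
        rw [show (i - s).toNat = (i - (s + 1)).toNat + 1 by omega, List.getD_cons_succ] at h3
        exact h3

lemma pv_contains_removed (L : List String) (k : Nat) (hk : k < L.length) :
    PySem.Set.contains (pvRemovedOf L) (k : Int) = pvIsRemoved (L.getD k "") := by
  have hmem : ((k : Int) ∈ pvRemovedOf L) ↔ pvIsRemoved (L.getD k "") = true := by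
    rw [pvRemovedOf, PySem.Set.mem_ofList, pv_mem_enum_filterMap L 0 (k : Int)]
    constructor
    · rintro ⟨-, -, h3⟩
      rwa [show ((k : Int) - 0).toNat = k by omega] at h3
    · intro h
      exact ⟨by omega, by omega, by rwa [show ((k : Int) - 0).toNat = k by omega]⟩
  cases hc : PySem.Set.contains (pvRemovedOf L) (k : Int) with
  | true => exact (hmem.1 ((PySem.Set.contains_iff _ _).1 hc)).symm
  | false =>
    cases hr : pvIsRemoved (L.getD k "") with
    | false => rfl
    | true =>
      exfalso
      have := (PySem.Set.contains_iff _ _).2 (hmem.2 hr)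
      rw [hc] at this
      exact Bool.false_ne_true this

lemma pv_not_contains_neg (L : List String) :
    PySem.Set.contains (pvRemovedOf L) (-1) = false := by
  cases hc : PySem.Set.contains (pvRemovedOf L) (-1) with
  | false => rfl
  | true =>
    exfalso
    have := (PySem.Set.contains_iff _ _).1 hc
    rw [pvRemovedOf, PySem.Set.mem_ofList, pv_mem_enum_filterMap L 0 (-1)] at this
    obtain ⟨h1, -, -⟩ := this
    omega

-- skip-flag invariant: A on the suffix L.drop k, with skip = "line k-1 was removed",
-- computes exactly B's filtered suffix from index k
lemma pv_main (L : List String) : ∀ (rest : List String) (k : Nat), L.drop k = rest →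
    pvGoA rest (PySem.Set.contains (pvRemovedOf L) ((k : Int) - 1)) =
    ((PySem.List.enumerate rest (k : Int)).filter
      (fun p => !(PySem.Set.contains (pvRemovedOf L) p.1)
             && !(PySem.Str.strip p.2 == "" && PySem.Set.contains (pvRemovedOf L) (p.1 - 1)))).map (fun p => p.2) := by
  intro rest
  induction rest with
  | nil => intro k _; simp [pvGoA, PySem.List.enumerate_nil]
  | cons l rest' ih =>
    intro k hdrop
    have hk : k < L.length := by
      by_contra h
      rw [List.drop_eq_nil_of_le (by omega)] at hdrop
      exact (List.cons_ne_nil l rest') hdrop.symm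
    have hget : L.getD k "" = l := by
      have h0 : (L.drop k).getD 0 "" = l := by rw [hdrop]; rfl
      rwa [List.getD_eq_getElem?_getD, List.getElem?_drop, Nat.add_zero,
        ← List.getD_eq_getElem?_getD] at h0
    have hdrop' : L.drop (k + 1) = rest' := by
      have h1 := congrArg (List.drop 1) hdrop
      rw [List.drop_drop] at h1
      exact h1
    have hcontk : PySem.Set.contains (pvRemovedOf L) ((k : Int)) = pvIsRemoved l := by
      rw [pv_contains_removed L k hk, hget]
    have hihr := ih (k + 1) hdrop'
    rw [show (((k + 1 : Nat) : Int)) = (k : Int) + 1 by push_cast; ring] at hihr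
    rw [show ((k : Int) + 1 - 1) = (k : Int) by ring] at hihr
    rw [PySem.List.enumerate_cons, List.filter_cons]
    by_cases hrem : pvIsRemoved l = true
    · -- line k is removed: A takes one of the four skip branches, B's filter drops it
      have hc : (!(PySem.Set.contains (pvRemovedOf L) (((k : Int), l).1))
             && !(PySem.Str.strip (((k : Int), l).2) == ""
                  && PySem.Set.contains (pvRemovedOf L) ((((k : Int), l).1) - 1))) = false := by
        show (!(PySem.Set.contains (pvRemovedOf L) ((k : Int))) && _) = false
        rw [hcontk, hrem]
        rfl
      rw [if_neg (by rw [hc]; exact Bool.false_ne_true)]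
      rw [hcontk] at hihr
      rw [hrem] at hihr
      show pvGoA (l :: rest') _ = _
      unfold pvGoA
      by_cases h1 : (PySem.Str.startswith (PySem.Str.strip l) "(define here"
          && PySem.Str.isIn "syntax-source" (PySem.Str.strip l)) = true
      · rw [if_pos h1]; exact hihr
      · rw [if_neg h1]
        by_cases h2 : (PySem.Str.startswith (PySem.Str.strip l) "(define lib-dir"
            && PySem.Str.isIn "build-path here" (PySem.Str.strip l)) = true
        · rw [if_pos h2]; exact hihr
        · rw [if_neg h2]
          by_cases h3 : (PySem.Str.startswith (PySem.Str.strip l) "(define prelude-lib-dir"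
              && PySem.Str.isIn "build-path here" (PySem.Str.strip l)) = true
          · rw [if_pos h3]; exact hihr
          · rw [if_neg h3]
            by_cases h4 : ((PySem.Str.strip l == ";; Compute the lib directory path"
                || PySem.Str.strip l == ";; Compute lib-dir from this file's location"
                || PySem.Str.strip l == ";; Helper for namespace-aware execution" : Bool)) = true
            · rw [if_pos h4]; exact hihr
            · exfalso
              have hx : pvIsRemoved l = true := hrem
              simp only [pvIsRemoved] at hx
              rw [Bool.eq_false_iff.mpr h1, Bool.eq_false_iff.mpr h2,
                  Bool.eq_false_iff.mpr h3, Bool.eq_false_iff.mpr h4] at hx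
              simp at hx
    · -- line k is not removed
      have hrem' : pvIsRemoved l = false := by
        cases h : pvIsRemoved l
        · rfl
        · exact absurd h hrem
      rw [hcontk] at hihr
      rw [hrem'] at hihr
      have hnall : ∀ c₁ c₂ c₃ c₄ : Bool,
          pvIsRemoved l = (c₁ || c₂ || c₃ || c₄) →
          c₁ = false ∧ c₂ = false ∧ c₃ = false ∧ c₄ = false := by
        intro c₁ c₂ c₃ c₄ he
        rw [hrem'] at he
        cases c₁ <;> cases c₂ <;> cases c₃ <;> cases c₄ <;>
          first
          | exact ⟨rfl, rfl, rfl, rfl⟩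
          | exact (Bool.false_ne_true he).elim
      obtain ⟨h1, h2, h3, h4⟩ := hnall _ _ _ _ rfl
      show pvGoA (l :: rest') _ = _
      unfold pvGoA
      rw [if_neg (by rw [h1]; exact Bool.false_ne_true),
          if_neg (by rw [h2]; exact Bool.false_ne_true),
          if_neg (by rw [h3]; exact Bool.false_ne_true),
          if_neg (by rw [h4]; exact Bool.false_ne_true)]
      by_cases hblank : (PySem.Set.contains (pvRemovedOf L) ((k : Int) - 1)
            && (PySem.Str.strip l == "")) = true
      · -- blank line after a removed line: both drop it
        rw [Bool.and_eq_true] at hblank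
        rw [if_pos (by rw [hblank.1, hblank.2]; rfl)]
        rw [if_neg (by
          show ¬ ((!(PySem.Set.contains (pvRemovedOf L) ((k : Int))) && _) = true)
          rw [hcontk, hrem', hblank.1, hblank.2]
          exact Bool.false_ne_true)]
        exact hihr
      · -- kept line
        rw [if_neg (by
          intro hcc
          rw [Bool.and_eq_true] at hcc
          exact hblank (by rw [hcc.1, hcc.2]; rfl))]
        have hc : (!(PySem.Set.contains (pvRemovedOf L) (((k : Int), l).1))
             && !(PySem.Str.strip (((k : Int), l).2) == ""
                  && PySem.Set.contains (pvRemovedOf L) ((((k : Int), l).1) - 1))) = true := by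
          show (!(PySem.Set.contains (pvRemovedOf L) ((k : Int)))
             && !(PySem.Str.strip l == ""
                  && PySem.Set.contains (pvRemovedOf L) ((k : Int) - 1))) = true
          rw [hcontk, hrem']
          cases hs : (PySem.Str.strip l == "") with
          | false => rfl
          | true =>
            cases hp : PySem.Set.contains (pvRemovedOf L) ((k : Int) - 1) with
            | false => rfl
            | true => exact absurd (by rw [hp, hs]; rfl) hblank
        rw [if_pos hc]
        rw [List.map_cons, hihr]

-- ===== VERDICT (by name: the statement is the Claim_ definition above) =====
theorem remove_here_lib_dir_definitions_spec : Claim_equal_remove_here_lib_dir_definitions := by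
  intro content _
  show remove_here_lib_dir_definitions content = remove_here_lib_dir_definitions_alt content
  simp only [remove_here_lib_dir_definitions, remove_here_lib_dir_definitions_alt]
  have h := pv_main ((PySem.Str.split? content "\n").getD [])
    ((PySem.Str.split? content "\n").getD []) 0 rfl
  rw [show ((0 : Nat) : Int) - 1 = -1 by ring, pv_not_contains_neg] at h
  rw [show ((0 : Nat) : Int) = (0 : Int) by norm_num] at h
  simp only [pvRemovedOf] at h
  rw [h]
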